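-- pv_equiv track=rewrite | github.com/Virgile-Foussereau/5G_scheduling | src/DP.py | DP2
-- ===== SOURCE A (Python) =====
-- def entier(L): #function to change every triplet values of r in p to int type
--     for n in range(len(L)):
--         for i in range(len(L[n])):
--             for k in range(len(L[n][i])):
--                 L[n][i][k]=int(L[n][i][k])
--     return L
--
-- def DP2(L,pmax,U): #Alternative DP algorithm for the ILP problem
--     L=entier(L)
--     U=int(U)
--     pmax=int(pmax)
--     P0=[]
--     for u in range(U+1):
--         min=pmax+1
--         for pr in L[0]:
--             if pr[1]==u and pr[0]<=min:
--                 min=pr[0]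
--         if min==pmax+1:
--             P0.append(0)
--         else:
--             P0.append(min)  #we compute the min power allocation for channel 0
--     P1=P0[:]
--     for n in range(1,len(L)):
--         for u in range(U+1):
--             min=pmax+1
--             for pr in L[n]:
--                 if pr[1]<=u and P0[u-pr[1]]>0 and pr[0]+P0[u-pr[1]]<=min:
--                     min=pr[0]+P0[u-pr[1]]
--             if min==pmax+1:
--                 P1[u]=0
--             else:
--                 P1[u]=min #we use the equation to compute the min step by step
--         P0=P1[:]
--     m=0
--     for u in range(len(P1)):
--         if P1[u]<=pmax and P1[u]>0:
--             m=u  #we reverse to find the best rate with a power less than pmax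
--     return (m,P1[m])
-- ===== SOURCE B (Python) =====
-- def DP2(L, pmax, U):
--     # Top-down memoized recursion over (channel, rate), queried lazily from the
--     # best rate downward (early exit), instead of A's bottom-up dense tables.
--     U = int(U)
--     pmax = int(pmax)
--     memo = {}
--
--     def f(n, u):
--         key = (n, u)
--         if key in memo:
--             return memo[key]
--         best = pmax + 1
--         if n == 0:
--             for pr in L[0]:
--                 if pr[1] == u and pr[0] < best:
--                     best = pr[0]
--         else:
--             for pr in L[n]:
--                 if pr[1] <= u:
--                     prev = f(n - 1, u - pr[1])
--                     if prev > 0 and pr[0] + prev < best: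
--                         best = pr[0] + prev
--         res = 0 if best == pmax + 1 else best
--         memo[key] = res
--         return res
--
--     for u in reversed(range(1, U + 1)):
--         v = f(len(L) - 1, u)
--         if v > 0:
--             return (u, v)
--     return (0, f(len(L) - 1, 0))
-- ===== Notes on version B (the rewrite author's own statement) =====
-- stated objective: alternative
-- what changed: A builds the full bottom-up DP table for every channel and every rate 0..U in staged passes and then scans the last row upward for the best rate; B is a top-down memoized recursion f(channel, rate) over a dict, queried lazily from rate U downward with an early return at the first achievable rate, so only the states actually reachable from the answer query are ever computed.
import Mathlib
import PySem

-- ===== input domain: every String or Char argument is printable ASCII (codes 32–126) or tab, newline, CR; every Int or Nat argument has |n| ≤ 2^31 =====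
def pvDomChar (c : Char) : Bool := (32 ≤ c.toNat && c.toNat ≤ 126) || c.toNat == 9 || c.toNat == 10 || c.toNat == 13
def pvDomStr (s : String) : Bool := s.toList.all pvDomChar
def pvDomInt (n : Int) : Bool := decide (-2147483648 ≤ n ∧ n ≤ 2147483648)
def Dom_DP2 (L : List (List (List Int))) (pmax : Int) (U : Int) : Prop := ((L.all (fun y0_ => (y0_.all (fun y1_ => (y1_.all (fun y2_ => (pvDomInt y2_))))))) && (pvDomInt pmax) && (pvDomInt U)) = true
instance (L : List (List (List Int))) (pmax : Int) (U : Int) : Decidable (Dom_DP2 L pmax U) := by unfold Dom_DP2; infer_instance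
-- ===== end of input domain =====

-- B replaces A's bottom-up dense-table DP by a top-down memoized recursion over (channel, rate),
-- queried lazily from the highest rate downward (alternative decomposition, same cost class).
-- A mutates L in place via entier(), but on int inputs the stored values are unchanged;
-- the equivalence proved here is about the return value.

-- ===== PORT A =====
-- entier: int(x) on an int is the identity, so the triple map rewrites each value to itself
def DP2_entier (L : List (List (List Int))) : List (List (List Int)) :=
  L.map (fun ch => ch.map (fun pr => pr.map (fun k => k)))

-- the inner 'for u in range(U+1)' building P0 (channel 0)
def DP2_chan0 (pmax U : Int) (L0 : List (List Int)) : List Int :=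
  (PySem.List.pyRange 0 (U+1) 1).map (fun u =>
    let m := L0.foldl (fun mn pr =>
        if PySem.List.pyGetD pr 1 0 = u ∧ PySem.List.pyGetD pr 0 0 ≤ mn
        then PySem.List.pyGetD pr 0 0 else mn) (pmax+1)
    if m = pmax+1 then 0 else m)

-- the body of 'for n in range(1, len(L))': rebuilds P1[u] for every u from P0
def DP2_chanStep (pmax U : Int) (P0 : List Int) (ch : List (List Int)) : List Int :=
  (PySem.List.pyRange 0 (U+1) 1).map (fun u =>
    let m := ch.foldl (fun mn pr =>
        if PySem.List.pyGetD pr 1 0 ≤ u ∧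
           0 < PySem.List.pyGetD P0 (u - PySem.List.pyGetD pr 1 0) 0 ∧
           PySem.List.pyGetD pr 0 0 + PySem.List.pyGetD P0 (u - PySem.List.pyGetD pr 1 0) 0 ≤ mn
        then PySem.List.pyGetD pr 0 0 + PySem.List.pyGetD P0 (u - PySem.List.pyGetD pr 1 0) 0
        else mn) (pmax+1)
    if m = pmax+1 then 0 else m)

def DP2 (L : List (List (List Int))) (pmax : Int) (U : Int) : Int × Int :=
  let L := DP2_entier L
  let P0 := DP2_chan0 pmax U (PySem.List.pyGetD L 0 [])
  let st := (PySem.List.pyRange 1 (L.length : Int) 1).foldl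
      (fun (st : List Int × List Int) n =>
        (DP2_chanStep pmax U st.1 (PySem.List.pyGetD L n []),
         DP2_chanStep pmax U st.1 (PySem.List.pyGetD L n []))) (P0, P0)
  let P1 := st.2
  let m := (PySem.List.pyRange 0 (P1.length : Int) 1).foldl (fun m u =>
      if PySem.List.pyGetD P1 u 0 ≤ pmax ∧ 0 < PySem.List.pyGetD P1 u 0 then u else m) 0
  (m, PySem.List.pyGetD P1 m 0)

-- ===== PORT B =====
-- one item of the inner 'for pr in L[n]' loop of f (state = running best, memo)
def DP2_altBStep (g : Int → PySem.Dict (Nat × Int) Int → Int × PySem.Dict (Nat × Int) Int)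
    (u : Int) (st : Int × PySem.Dict (Nat × Int) Int) (pr : List Int) :
    Int × PySem.Dict (Nat × Int) Int :=
  if PySem.List.pyGetD pr 1 0 ≤ u then
    let pm := g (u - PySem.List.pyGetD pr 1 0) st.2
    if 0 < pm.1 ∧ PySem.List.pyGetD pr 0 0 + pm.1 < st.1
    then (PySem.List.pyGetD pr 0 0 + pm.1, pm.2) else (st.1, pm.2)
  else st

-- the memoized recursive helper f(n, u); the dict 'memo' is threaded through explicitly
def DP2_altF (L : List (List (List Int))) (pmax : Int) :
    Nat → Int → PySem.Dict (Nat × Int) Int → Int × PySem.Dict (Nat × Int) Int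
  | 0, u, memo =>
    match memo.get? (0, u) with
    | some v => (v, memo)
    | none =>
      let best := (PySem.List.pyGetD L 0 []).foldl
        (fun b pr => if PySem.List.pyGetD pr 1 0 = u ∧ PySem.List.pyGetD pr 0 0 < b
                     then PySem.List.pyGetD pr 0 0 else b) (pmax + 1)
      let res := if best = pmax + 1 then 0 else best
      (res, memo.insert (0, u) res)
  | n+1, u, memo =>
    match memo.get? (n+1, u) with
    | some v => (v, memo)
    | none =>
      let st := (PySem.List.pyGetD L ((n : Int) + 1) []).foldl
        (DP2_altBStep (fun u' m' => DP2_altF L pmax n u' m') u) (pmax + 1, memo)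
      let res := if st.1 = pmax + 1 then 0 else st.1
      (res, st.2.insert (n+1, u) res)

-- 'for u in reversed(range(1, U+1)): v = f(len(L)-1, u); if v > 0: return (u, v)'
def DP2_altScan (L : List (List (List Int))) (pmax : Int) :
    List Int → PySem.Dict (Nat × Int) Int →
      Option (Int × Int) × PySem.Dict (Nat × Int) Int
  | [], memo => (none, memo)
  | u :: rest, memo =>
    let vm := DP2_altF L pmax (L.length - 1) u memo
    if 0 < vm.1 then (some (u, vm.1), vm.2) else DP2_altScan L pmax rest vm.2

def DP2_alt (L : List (List (List Int))) (pmax : Int) (U : Int) : Int × Int :=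
  match DP2_altScan L pmax ((PySem.List.pyRange 1 (U+1) 1).reverse) PySem.Dict.empty with
  | (some p, _) => p
  | (none, memo) => (0, (DP2_altF L pmax (L.length - 1) 0 memo).1)

-- ===== PRECONDITION & SPEC =====
-- Pre_ = exactly the inputs where Python A returns: A raises IndexError when L is empty (L[0]),
-- when U < 0 (P1[0] on an empty P1), when some triplet has fewer than 2 entries (pr[1]), or when
-- some triplet of a channel after the first has a negative rate pr[1] (P0[u-pr[1]] out of range
-- at u = U, which the loop always reaches).
def Pre_DP2 (L : List (List (List Int))) (pmax : Int) (U : Int) : Prop :=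
  L ≠ [] ∧ 0 ≤ U ∧ (∀ ch ∈ L, ∀ pr ∈ ch, 2 ≤ pr.length) ∧
    (∀ ch ∈ L.drop 1, ∀ pr ∈ ch, 0 ≤ PySem.List.pyGetD pr 1 0)
instance (L : List (List (List Int))) (pmax : Int) (U : Int) : Decidable (Pre_DP2 L pmax U) := by
  unfold Pre_DP2; infer_instance

def pvWitness_DP2 : List (List (List Int)) × Int × Int := ([[[2, 1], [3, 2]], [[1, 1]]], 5, 3)

def Spec_DP2 (L : List (List (List Int))) (pmax : Int) (U : Int) (out : Int × Int) : Prop := out = DP2_alt L pmax U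
instance (L : List (List (List Int))) (pmax : Int) (U : Int) (out : Int × Int) : Decidable (Spec_DP2 L pmax U out) := by unfold Spec_DP2; infer_instance

-- ===== CLAIM (what is proved, stated in full; the proofs are below) =====
def Claim_equal_DP2 : Prop := ∀ (L : List (List (List Int))) (pmax : Int) (U : Int), Dom_DP2 L pmax U → Pre_DP2 L pmax U → Spec_DP2 L pmax U (DP2 L pmax U)

-- ===== LEMMAS AND PROOFS =====

-- the memoization-free value of B's recursion f(n, u)
def pvGB (L : List (List (List Int))) (pmax : Int) : Nat → Int → Int
  | 0, u =>
    let best := (PySem.List.pyGetD L 0 []).foldl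
      (fun b pr => if PySem.List.pyGetD pr 1 0 = u ∧ PySem.List.pyGetD pr 0 0 < b
                   then PySem.List.pyGetD pr 0 0 else b) (pmax + 1)
    if best = pmax + 1 then 0 else best
  | n+1, u =>
    let best := (PySem.List.pyGetD L ((n : Int) + 1) []).foldl
      (fun b pr =>
        if PySem.List.pyGetD pr 1 0 ≤ u then
          (if 0 < pvGB L pmax n (u - PySem.List.pyGetD pr 1 0) ∧
              PySem.List.pyGetD pr 0 0 + pvGB L pmax n (u - PySem.List.pyGetD pr 1 0) < b
           then PySem.List.pyGetD pr 0 0 + pvGB L pmax n (u - PySem.List.pyGetD pr 1 0) else b)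
        else b) (pmax + 1)
    if best = pmax + 1 then 0 else best

-- every memo entry stores the pure value
def pvInvM (L : List (List (List Int))) (pmax : Int)
    (memo : PySem.Dict (Nat × Int) Int) : Prop :=
  ∀ n u v, memo.get? (n, u) = some v → v = pvGB L pmax n u

lemma pv_invM_empty (L : List (List (List Int))) (pmax : Int) :
    pvInvM L pmax PySem.Dict.empty := by
  intro n u v h
  simp [PySem.Dict.get?_empty] at h

lemma pv_invM_insert (L : List (List (List Int))) (pmax : Int)
    (memo : PySem.Dict (Nat × Int) Int) (h : pvInvM L pmax memo) (n : Nat) (u : Int) :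
    pvInvM L pmax (memo.insert (n, u) (pvGB L pmax n u)) := by
  intro n' u' v hg
  rw [PySem.Dict.get?_insert] at hg
  split_ifs at hg with he
  · cases Prod.mk.injEq .. ▸ he with
    | intro h1 h2 => subst h1; subst h2; exact (Option.some.inj hg).symm
  · exact h n' u' v hg

-- f computes the pure value and preserves the invariant
lemma pv_altF_eq (L : List (List (List Int))) (pmax : Int) :
    ∀ (n : Nat) (u : Int) (memo : PySem.Dict (Nat × Int) Int), pvInvM L pmax memo →
      (DP2_altF L pmax n u memo).1 = pvGB L pmax n u ∧
        pvInvM L pmax (DP2_altF L pmax n u memo).2 := by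
  intro n
  induction n with
  | zero =>
    intro u memo hm
    unfold DP2_altF
    cases hg : memo.get? (0, u) with
    | some v =>
      exact ⟨hm 0 u v hg, hm⟩
    | none =>
      refine ⟨by simp [pvGB], ?_⟩
      have := pv_invM_insert L pmax memo hm 0 u
      simpa [pvGB] using this
  | succ n ih =>
    intro u memo hm
    unfold DP2_altF
    cases hg : memo.get? (n+1, u) with
    | some v =>
      exact ⟨hm (n+1) u v hg, hm⟩
    | none =>
      have hfold : ∀ (l : List (List Int)) (b : Int) (memo : PySem.Dict (Nat × Int) Int),
          pvInvM L pmax memo →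
          (l.foldl (DP2_altBStep (fun u' m' => DP2_altF L pmax n u' m') u) (b, memo)).1
            = l.foldl (fun b pr =>
                if PySem.List.pyGetD pr 1 0 ≤ u then
                  (if 0 < pvGB L pmax n (u - PySem.List.pyGetD pr 1 0) ∧
                      PySem.List.pyGetD pr 0 0 + pvGB L pmax n (u - PySem.List.pyGetD pr 1 0) < b
                   then PySem.List.pyGetD pr 0 0 + pvGB L pmax n (u - PySem.List.pyGetD pr 1 0)
                   else b)
                else b) b ∧
          pvInvM L pmax
            (l.foldl (DP2_altBStep (fun u' m' => DP2_altF L pmax n u' m') u) (b, memo)).2 := by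
        intro l
        induction l with
        | nil => intro b memo hm; exact ⟨rfl, hm⟩
        | cons pr t iht =>
          intro b memo hm
          rw [List.foldl_cons, List.foldl_cons]
          by_cases hle : PySem.List.pyGetD pr 1 0 ≤ u
          · obtain ⟨h1, h2⟩ := ih (u - PySem.List.pyGetD pr 1 0) memo hm
            have hev : DP2_altBStep (fun u' m' => DP2_altF L pmax n u' m') u (b, memo) pr
                = if 0 < (DP2_altF L pmax n (u - PySem.List.pyGetD pr 1 0) memo).1 ∧
                     PySem.List.pyGetD pr 0 0 + (DP2_altF L pmax n (u - PySem.List.pyGetD pr 1 0) memo).1 < b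
                  then (PySem.List.pyGetD pr 0 0 + (DP2_altF L pmax n (u - PySem.List.pyGetD pr 1 0) memo).1,
                        (DP2_altF L pmax n (u - PySem.List.pyGetD pr 1 0) memo).2)
                  else (b, (DP2_altF L pmax n (u - PySem.List.pyGetD pr 1 0) memo).2) := by
              rw [DP2_altBStep, if_pos hle]
            rw [hev, h1, if_pos hle]
            by_cases hc : 0 < pvGB L pmax n (u - PySem.List.pyGetD pr 1 0) ∧
                PySem.List.pyGetD pr 0 0 + pvGB L pmax n (u - PySem.List.pyGetD pr 1 0) < b
            · rw [if_pos hc, if_pos hc]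
              exact iht _ _ h2
            · rw [if_neg hc, if_neg hc]
              exact iht _ _ h2
          · have hev : DP2_altBStep (fun u' m' => DP2_altF L pmax n u' m') u (b, memo) pr
                = (b, memo) := by
              rw [DP2_altBStep, if_neg hle]
            rw [hev, if_neg hle]
            exact iht b memo hm
      obtain ⟨h1, h2⟩ := hfold (PySem.List.pyGetD L ((n : Int) + 1) []) (pmax + 1) memo hm
      constructor
      · dsimp only
        rw [h1]
        simp [pvGB]
      · dsimp only
        have := pv_invM_insert L pmax _ h2 (n+1) u
        rw [h1]
        simpa [pvGB] using this

-- pure form of B's downward scan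
def pvScanP (L : List (List (List Int))) (pmax : Int) : List Int → Option (Int × Int)
  | [] => none
  | u :: t =>
    if 0 < pvGB L pmax (L.length - 1) u
    then some (u, pvGB L pmax (L.length - 1) u)
    else pvScanP L pmax t

lemma pv_altScan_eq (L : List (List (List Int))) (pmax : Int) :
    ∀ (l : List Int) (memo : PySem.Dict (Nat × Int) Int), pvInvM L pmax memo →
      (DP2_altScan L pmax l memo).1 = pvScanP L pmax l ∧
        pvInvM L pmax (DP2_altScan L pmax l memo).2 := by
  intro l
  induction l with
  | nil => intro memo hm; exact ⟨rfl, hm⟩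
  | cons x t ih =>
    intro memo hm
    obtain ⟨h1, h2⟩ := pv_altF_eq L pmax (L.length - 1) x memo hm
    unfold DP2_altScan
    dsimp only
    rw [h1]
    by_cases hp : 0 < pvGB L pmax (L.length - 1) x
    · rw [if_pos hp]
      exact ⟨by simp [pvScanP, hp], h2⟩
    · rw [if_neg hp]
      obtain ⟨h3, h4⟩ := ih _ h2
      exact ⟨by simp [pvScanP, hp, h3], h4⟩

lemma pv_scanP_eq_find (L : List (List (List Int))) (pmax : Int) (l : List Int) :
    pvScanP L pmax l
      = (l.find? (fun u => decide (0 < pvGB L pmax (L.length - 1) u))).map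
          (fun u => (u, pvGB L pmax (L.length - 1) u)) := by
  induction l with
  | nil => rfl
  | cons x t ih =>
    by_cases hp : 0 < pvGB L pmax (L.length - 1) x
    · simp [pvScanP, hp]
    · simp [pvScanP, hp, ih]

-- ---- A side ----

-- getters used throughout the proofs
def pvG0 (pr : List Int) : Int := PySem.List.pyGetD pr 0 0
def pvG1 (pr : List Int) : Int := PySem.List.pyGetD pr 1 0

-- A's collapse of the running minimum
def pvCollapse (pmax : Int) (vs : List Int) : Int :=
  let m := vs.foldl min (pmax+1)
  if m = pmax+1 then 0 else m

lemma pv_entier_id (L : List (List (List Int))) : DP2_entier L = L := by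
  simp [DP2_entier]

-- A's conditional fold is a min-fold over the filtered & mapped candidate list
lemma pv_foldl_if_min {α : Type} (l : List α) (P : α → Prop) [DecidablePred P]
    (f : α → Int) (a : Int) :
    l.foldl (fun mn x => if P x ∧ f x ≤ mn then f x else mn) a
      = ((l.filter (fun x => decide (P x))).map f).foldl min a := by
  induction l generalizing a with
  | nil => rfl
  | cons x t ih =>
    by_cases hp : P x
    · by_cases hle : f x ≤ a
      · simp [hp, hle, ih]
      · have : min a (f x) = a := by omega
        simp [hp, hle, ih, this]
    · simp [hp, ih]

-- B's strict-< running minimum equals A's ≤ running minimum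
lemma pv_foldl_lt_le {α : Type} (l : List α) (P : α → Prop) [DecidablePred P]
    (f : α → Int) (a : Int) :
    l.foldl (fun b x => if P x ∧ f x < b then f x else b) a
      = l.foldl (fun b x => if P x ∧ f x ≤ b then f x else b) a := by
  induction l generalizing a with
  | nil => rfl
  | cons x t ih =>
    have hstep : (if P x ∧ f x < a then f x else a) = (if P x ∧ f x ≤ a then f x else a) := by
      by_cases hp : P x
      · simp only [hp, true_and]
        split_ifs <;> omega
      · simp only [hp, false_and, if_false]
    rw [List.foldl_cons, List.foldl_cons, ih, hstep]

-- A's rows, by channel index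
def pvArow (L : List (List (List Int))) (pmax U : Int) : Nat → List Int
  | 0 => DP2_chan0 pmax U (PySem.List.pyGetD L 0 [])
  | n+1 => DP2_chanStep pmax U (pvArow L pmax U n) (PySem.List.pyGetD L ((n : Int) + 1) [])

lemma pv_arow_fold (L : List (List (List Int))) (pmax U : Int) :
    ∀ k : Nat, (PySem.List.pyRange 1 ((k : Int) + 1) 1).foldl
        (fun P i => DP2_chanStep pmax U P (PySem.List.pyGetD L i []))
        (DP2_chan0 pmax U (PySem.List.pyGetD L 0 []))
      = pvArow L pmax U k := by
  intro k
  induction k with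
  | zero => rw [PySem.List.pyRange_one_eq_nil (by norm_num)]; rfl
  | succ k ih =>
    have hsplit : PySem.List.pyRange 1 (((k+1 : Nat) : Int) + 1) 1
        = PySem.List.pyRange 1 ((k : Int) + 1) 1 ++ [(k : Int) + 1] := by
      push_cast
      exact PySem.List.pyRange_one_succ_right (by omega)
    rw [hsplit, List.foldl_append, ih]
    simp [pvArow]

lemma pv_chan0_length (pmax U : Int) (L0 : List (List Int)) :
    (DP2_chan0 pmax U L0).length = (U+1).toNat := by
  simp [DP2_chan0, PySem.List.length_pyRange_one]

lemma pv_chanstep_length (pmax U : Int) (P : List Int) (ch : List (List Int)) :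
    (DP2_chanStep pmax U P ch).length = (U+1).toNat := by
  simp [DP2_chanStep, PySem.List.length_pyRange_one]

lemma pv_arow_length (L : List (List (List Int))) (pmax U : Int) (n : Nat) :
    (pvArow L pmax U n).length = (U+1).toNat := by
  cases n with
  | zero => exact pv_chan0_length pmax U _
  | succ n => exact pv_chanstep_length pmax U _ _

lemma pv_chan0_get (pmax U : Int) (L0 : List (List Int)) (i : Nat) (hi : i < (U+1).toNat) :
    (DP2_chan0 pmax U L0)[i]'(by rw [pv_chan0_length]; exact hi)
      = pvCollapse pmax ((L0.filter (fun pr => decide (PySem.List.pyGetD pr 1 0 = (i:Int)))).map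
          (fun pr => PySem.List.pyGetD pr 0 0)) := by
  unfold DP2_chan0
  rw [List.getElem_map]
  have hr : (PySem.List.pyRange 0 (U+1) 1)[i]'(by rw [PySem.List.length_pyRange_one]; simpa using hi) = (i:Int) := by
    rw [PySem.List.getElem_pyRange_one]; omega
  rw [hr]
  dsimp only
  rw [pv_foldl_if_min L0 (fun pr => PySem.List.pyGetD pr 1 0 = (i:Int))
    (fun pr => PySem.List.pyGetD pr 0 0) (pmax+1)]
  rfl

lemma pv_chanstep_get (pmax U : Int) (P : List Int) (ch : List (List Int)) (i : Nat)
    (hi : i < (U+1).toNat) :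
    (DP2_chanStep pmax U P ch)[i]'(by rw [pv_chanstep_length]; exact hi)
      = pvCollapse pmax
          ((ch.filter (fun pr => decide (pvG1 pr ≤ (i:Int) ∧
              0 < PySem.List.pyGetD P ((i:Int) - pvG1 pr) 0))).map
            (fun pr => pvG0 pr + PySem.List.pyGetD P ((i:Int) - pvG1 pr) 0)) := by
  unfold DP2_chanStep
  rw [List.getElem_map]
  have hr : (PySem.List.pyRange 0 (U+1) 1)[i]'(by rw [PySem.List.length_pyRange_one]; simpa using hi) = (i:Int) := by
    rw [PySem.List.getElem_pyRange_one]; omega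
  rw [hr]
  have hcong : ch.foldl (fun mn pr =>
      if PySem.List.pyGetD pr 1 0 ≤ (i:Int) ∧
         0 < PySem.List.pyGetD P ((i:Int) - PySem.List.pyGetD pr 1 0) 0 ∧
         PySem.List.pyGetD pr 0 0 + PySem.List.pyGetD P ((i:Int) - PySem.List.pyGetD pr 1 0) 0 ≤ mn
      then PySem.List.pyGetD pr 0 0 + PySem.List.pyGetD P ((i:Int) - PySem.List.pyGetD pr 1 0) 0
      else mn) (pmax+1)
    = ch.foldl (fun mn pr =>
      if (PySem.List.pyGetD pr 1 0 ≤ (i:Int) ∧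
          0 < PySem.List.pyGetD P ((i:Int) - PySem.List.pyGetD pr 1 0) 0) ∧
         PySem.List.pyGetD pr 0 0 + PySem.List.pyGetD P ((i:Int) - PySem.List.pyGetD pr 1 0) 0 ≤ mn
      then PySem.List.pyGetD pr 0 0 + PySem.List.pyGetD P ((i:Int) - PySem.List.pyGetD pr 1 0) 0
      else mn) (pmax+1) :=
    PySem.List.foldl_congr_mem _ _ _ _ (fun mn pr _ => if_congr and_assoc.symm rfl rfl)
  dsimp only
  rw [hcong, pv_foldl_if_min ch
    (fun pr => PySem.List.pyGetD pr 1 0 ≤ (i:Int) ∧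
      0 < PySem.List.pyGetD P ((i:Int) - PySem.List.pyGetD pr 1 0) 0)
    (fun pr => PySem.List.pyGetD pr 0 0 + PySem.List.pyGetD P ((i:Int) - PySem.List.pyGetD pr 1 0) 0)
    (pmax+1)]
  rfl

-- A's pair state (P0, P1) always has equal components
lemma pv_pair_foldl {α β : Type} (l : List α) (g : β → α → β) (x : β) :
    l.foldl (fun st c => (g st.1 c, g st.1 c)) (x, x) = (l.foldl g x, l.foldl g x) := by
  induction l generalizing x with
  | nil => rfl
  | cons c t ih => simpa using ih (g x c)

-- reading A's n-th row at a rate inside [0, U] gives the pure recursion's value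
lemma pv_arow_get (L : List (List (List Int))) (pmax U : Int) (hU : 0 ≤ U)
    (hr : ∀ ch ∈ L.drop 1, ∀ pr ∈ ch, 0 ≤ PySem.List.pyGetD pr 1 0) :
    ∀ (n : Nat) (u : Int), 0 ≤ u → u ≤ U →
      PySem.List.pyGetD (pvArow L pmax U n) u 0 = pvGB L pmax n u := by
  intro n
  induction n with
  | zero =>
    intro u hu0 huU
    have hlt : u < ((pvArow L pmax U 0).length : Int) := by
      rw [pv_arow_length]; omega
    rw [PySem.List.pyGetD_eq_getElem _ 0 hu0 hlt]
    have hi : u.toNat < (U+1).toNat := by omega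
    have := pv_chan0_get pmax U (PySem.List.pyGetD L 0 []) u.toNat hi
    simp only [pvArow]
    simp only [this]
    have hcast : ((u.toNat : Nat) : Int) = u := by omega
    rw [hcast]
    show _ = pvGB L pmax 0 u
    rw [pvGB]
    rw [pv_foldl_lt_le (PySem.List.pyGetD L 0 [])
      (fun pr => PySem.List.pyGetD pr 1 0 = u) (fun pr => PySem.List.pyGetD pr 0 0) (pmax+1),
      pv_foldl_if_min (PySem.List.pyGetD L 0 [])
      (fun pr => PySem.List.pyGetD pr 1 0 = u) (fun pr => PySem.List.pyGetD pr 0 0) (pmax+1)]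
    rfl
  | succ n ih =>
    intro u hu0 huU
    have hch : ∀ pr ∈ PySem.List.pyGetD L ((n : Int) + 1) [], 0 ≤ PySem.List.pyGetD pr 1 0 := by
      intro pr hpr
      by_cases hlen : (n : Int) + 1 < (L.length : Int)
      · have hget : PySem.List.pyGetD L ((n : Int) + 1) [] = L[n+1]'(by omega) := by
          rw [PySem.List.pyGetD_eq_getElem L [] (by omega) hlen]
          exact getElem_congr_idx (by omega)
        rw [hget] at hpr
        have hmem : L[n+1]'(by omega) ∈ L.drop 1 := by
          have : L[n+1]'(by omega) = (L.drop 1)[n]'(by rw [List.length_drop]; omega) := by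
            rw [List.getElem_drop]
            exact getElem_congr_idx (by omega)
          rw [this]
          exact List.getElem_mem _
        exact hr _ hmem pr hpr
      · have hnil : PySem.List.pyGetD L ((n : Int) + 1) [] = [] := by
          rw [show ((n : Int) + 1) = ((n+1 : Nat) : Int) from by push_cast; ring,
            PySem.List.pyGetD_natCast, List.getD_eq_default]
          omega
        rw [hnil] at hpr
        simp at hpr
    have hlt : u < ((pvArow L pmax U (n+1)).length : Int) := by
      rw [pv_arow_length]; omega
    rw [PySem.List.pyGetD_eq_getElem _ 0 hu0 hlt]
    have hi : u.toNat < (U+1).toNat := by omega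
    simp only [pvArow]
    simp only [pv_chanstep_get pmax U (pvArow L pmax U n) (PySem.List.pyGetD L ((n : Int) + 1) []) u.toNat hi]
    have hcast : ((u.toNat : Nat) : Int) = u := by omega
    rw [hcast]
    -- now convert pvGB (n+1) u to the same collapse form
    rw [pvGB]
    set ch := PySem.List.pyGetD L ((n : Int) + 1) [] with hchdef
    have hstep1 : ch.foldl (fun b pr =>
        if PySem.List.pyGetD pr 1 0 ≤ u then
          (if 0 < pvGB L pmax n (u - PySem.List.pyGetD pr 1 0) ∧
              PySem.List.pyGetD pr 0 0 + pvGB L pmax n (u - PySem.List.pyGetD pr 1 0) < b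
           then PySem.List.pyGetD pr 0 0 + pvGB L pmax n (u - PySem.List.pyGetD pr 1 0) else b)
        else b) (pmax+1)
      = ch.foldl (fun b pr =>
          if (pvG1 pr ≤ u ∧ 0 < PySem.List.pyGetD (pvArow L pmax U n) (u - pvG1 pr) 0) ∧
             pvG0 pr + PySem.List.pyGetD (pvArow L pmax U n) (u - pvG1 pr) 0 < b
          then pvG0 pr + PySem.List.pyGetD (pvArow L pmax U n) (u - pvG1 pr) 0 else b) (pmax+1) := by
      apply PySem.List.foldl_congr_mem
      intro b pr hpr
      by_cases hle : PySem.List.pyGetD pr 1 0 ≤ u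
      · have hr0 : 0 ≤ PySem.List.pyGetD pr 1 0 := hch pr hpr
        have hread : PySem.List.pyGetD (pvArow L pmax U n) (u - pvG1 pr) 0
            = pvGB L pmax n (u - pvG1 pr) := by
          apply ih
          · simp only [pvG1]; omega
          · simp only [pvG1]; omega
        rw [if_pos hle]
        simp only [pvG0, pvG1] at hread ⊢
        rw [hread]
        split_ifs with h1 h2 h2 <;> first | rfl | tauto
      · rw [if_neg hle, if_neg (by simp only [pvG1]; tauto)]
    rw [hstep1,
      pv_foldl_lt_le ch
        (fun pr => pvG1 pr ≤ u ∧ 0 < PySem.List.pyGetD (pvArow L pmax U n) (u - pvG1 pr) 0)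
        (fun pr => pvG0 pr + PySem.List.pyGetD (pvArow L pmax U n) (u - pvG1 pr) 0) (pmax+1),
      pv_foldl_if_min ch
        (fun pr => pvG1 pr ≤ u ∧ 0 < PySem.List.pyGetD (pvArow L pmax U n) (u - pvG1 pr) 0)
        (fun pr => pvG0 pr + PySem.List.pyGetD (pvArow L pmax U n) (u - pvG1 pr) 0) (pmax+1)]
    rfl

-- a fold whose step never increases the accumulator stays ≤ the start
lemma pv_foldl_dec {α : Type} (g : Int → α → Int) (h : ∀ b x, g b x ≤ b) :
    ∀ (l : List α) (b : Int), l.foldl g b ≤ b := by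
  intro l
  induction l with
  | nil => intro b; simp
  | cons x t ih => intro b; exact le_trans (ih (g b x)) (h b x)

-- pure values are 0 or within the power budget
lemma pv_gB_le (L : List (List (List Int))) (pmax : Int) (n : Nat) (u : Int) :
    pvGB L pmax n u = 0 ∨ pvGB L pmax n u ≤ pmax := by
  cases n with
  | zero =>
    rw [pvGB]
    set best := (PySem.List.pyGetD L 0 []).foldl
      (fun b pr => if PySem.List.pyGetD pr 1 0 = u ∧ PySem.List.pyGetD pr 0 0 < b
                   then PySem.List.pyGetD pr 0 0 else b) (pmax + 1) with hb
    have hle : best ≤ pmax + 1 := by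
      rw [hb]
      apply pv_foldl_dec
      intro b x
      split_ifs with h
      · omega
      · omega
    split_ifs with he
    · left; rfl
    · right; omega
  | succ n =>
    rw [pvGB]
    set best := (PySem.List.pyGetD L ((n : Int) + 1) []).foldl
      (fun b pr =>
        if PySem.List.pyGetD pr 1 0 ≤ u then
          (if 0 < pvGB L pmax n (u - PySem.List.pyGetD pr 1 0) ∧
              PySem.List.pyGetD pr 0 0 + pvGB L pmax n (u - PySem.List.pyGetD pr 1 0) < b
           then PySem.List.pyGetD pr 0 0 + pvGB L pmax n (u - PySem.List.pyGetD pr 1 0) else b)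
        else b) (pmax + 1) with hb
    have hle : best ≤ pmax + 1 := by
      rw [hb]
      apply pv_foldl_dec
      intro b x
      split_ifs with h1 h2 <;> omega
    split_ifs with he
    · left; rfl
    · right; omega

-- A's last-match upward fold equals the first match of the reversed 1..k range
lemma pv_fold_find (g : Int → Int) :
    ∀ k : Nat, (PySem.List.pyRange 0 ((k : Int) + 1) 1).foldl
        (fun m u => if 0 < g u then u else m) 0
      = (((PySem.List.pyRange 1 ((k : Int) + 1) 1).reverse.find?
            (fun u => decide (0 < g u))).getD 0) := by
  intro k
  induction k with
  | zero =>
    rw [show ((0 : Nat) : Int) + 1 = 0 + 1 from by norm_num,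
      PySem.List.pyRange_one_singleton, PySem.List.pyRange_one_eq_nil (by norm_num)]
    simp only [List.reverse_nil, List.find?_nil, Option.getD_none, List.foldl_cons, List.foldl_nil]
    split_ifs <;> rfl
  | succ k ih =>
    have h1 : PySem.List.pyRange 0 (((k+1 : Nat) : Int) + 1) 1
        = PySem.List.pyRange 0 ((k : Int) + 1) 1 ++ [(k : Int) + 1] := by
      push_cast
      exact PySem.List.pyRange_one_succ_right (by omega)
    have h2 : PySem.List.pyRange 1 (((k+1 : Nat) : Int) + 1) 1
        = PySem.List.pyRange 1 ((k : Int) + 1) 1 ++ [(k : Int) + 1] := by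
      push_cast
      exact PySem.List.pyRange_one_succ_right (by omega)
    rw [h1, h2, List.foldl_append, List.reverse_append]
    simp only [List.reverse_cons, List.reverse_nil, List.nil_append, List.singleton_append,
      List.foldl_cons, List.foldl_nil, List.find?_cons]
    by_cases hp : 0 < g ((k : Int) + 1)
    · rw [if_pos hp]
      simp [hp]
    · rw [if_neg hp]
      simp only [show (decide (0 < g ((k : Int) + 1))) = false from by simpa using hp]
      exact ih

-- membership of the scanned range
lemma pv_find_mem (g : Int → Int) (a b u : Int)
    (h : ((PySem.List.pyRange a b 1).reverse.find? (fun u => decide (0 < g u))) = some u) :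
    a ≤ u ∧ u < b ∧ 0 < g u := by
  have hmem := List.mem_of_find?_eq_some h
  have hpred := List.find?_some h
  rw [List.mem_reverse, PySem.List.mem_pyRange_one] at hmem
  simp only [decide_eq_true_eq] at hpred
  exact ⟨hmem.1, hmem.2, hpred⟩

-- ===== VERDICT (by name: the statement is the Claim_ definition above) =====
theorem DP2_spec : Claim_equal_DP2 := by
  intro L pmax U _ hpre
  obtain ⟨hne, hU, _, hr⟩ := hpre
  unfold Spec_DP2 DP2 DP2_alt
  dsimp only
  rw [pv_entier_id]
  -- A's channel fold produces pvArow (len-1)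
  have hlen1 : (L.length : Int) = ((L.length - 1 : Nat) : Int) + 1 := by
    have : 1 ≤ L.length := List.length_pos_iff.2 hne
    omega
  rw [pv_pair_foldl (PySem.List.pyRange 1 (L.length : Int) 1)
    (fun P n => DP2_chanStep pmax U P (PySem.List.pyGetD L n []))
    (DP2_chan0 pmax U (PySem.List.pyGetD L 0 []))]
  dsimp only
  rw [hlen1, pv_arow_fold L pmax U (L.length - 1)]
  set N := L.length - 1 with hN
  set P1 := pvArow L pmax U N with hP1
  have hrowget : ∀ u : Int, 0 ≤ u → u ≤ U →
      PySem.List.pyGetD P1 u 0 = pvGB L pmax N u :=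
    fun u h1 h2 => pv_arow_get L pmax U hU hr N u h1 h2
  have hlenP : (P1.length : Int) = U + 1 := by
    rw [hP1, pv_arow_length]; omega
  rw [hlenP]
  -- rewrite A's final fold condition to 0 < pvGB
  have hcond : (PySem.List.pyRange 0 (U+1) 1).foldl
      (fun m u => if PySem.List.pyGetD P1 u 0 ≤ pmax ∧ 0 < PySem.List.pyGetD P1 u 0 then u else m) 0
    = (PySem.List.pyRange 0 (U+1) 1).foldl
      (fun m u => if 0 < pvGB L pmax N u then u else m) 0 := by
    apply PySem.List.foldl_congr_mem
    intro m u hu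
    have hu' := (PySem.List.mem_pyRange_one).1 hu
    rw [hrowget u hu'.1 (by omega)]
    rcases pv_gB_le L pmax N u with h0 | hle
    · rw [h0]
      norm_num
    · by_cases hp : 0 < pvGB L pmax N u
      · rw [if_pos ⟨hle, hp⟩, if_pos hp]
      · rw [if_neg (by tauto), if_neg hp]
  rw [hcond]
  have hUk : U = ((U.toNat : Nat) : Int) := by omega
  rw [hUk, pv_fold_find (pvGB L pmax N) U.toNat]
  -- B's side: replace the memoized scan by the pure scan
  obtain ⟨hs1, hs2⟩ := pv_altScan_eq L pmax
    ((PySem.List.pyRange 1 (((U.toNat : Nat) : Int) + 1) 1).reverse) PySem.Dict.empty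
    (pv_invM_empty L pmax)
  rw [pv_scanP_eq_find] at hs1
  cases hfind : ((PySem.List.pyRange 1 (((U.toNat : Nat) : Int) + 1) 1).reverse.find?
      (fun u => decide (0 < pvGB L pmax (L.length - 1) u))) with
  | some u =>
    obtain ⟨hu1, hu2, hu3⟩ := pv_find_mem (pvGB L pmax (L.length - 1)) 1 (((U.toNat : Nat) : Int) + 1) u hfind
    have hsp : (DP2_altScan L pmax
        ((PySem.List.pyRange 1 (((U.toNat : Nat) : Int) + 1) 1).reverse) PySem.Dict.empty).1
        = some (u, pvGB L pmax (L.length - 1) u) := by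
      rw [hs1, hfind]; rfl
    rcases hscan : DP2_altScan L pmax
        ((PySem.List.pyRange 1 (((U.toNat : Nat) : Int) + 1) 1).reverse) PySem.Dict.empty with ⟨o, memo⟩
    rw [hscan] at hsp
    dsimp at hsp
    rw [hsp]
    dsimp only
    simp only [Option.getD_some]
    have hval : PySem.List.pyGetD P1 u 0 = pvGB L pmax N u :=
      hrowget u (by omega) (by omega)
    rw [hN] at hval
    rw [hval]
  | none =>
    have hsp : (DP2_altScan L pmax
        ((PySem.List.pyRange 1 (((U.toNat : Nat) : Int) + 1) 1).reverse) PySem.Dict.empty).1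
        = none := by
      rw [hs1, hfind]; rfl
    rcases hscan : DP2_altScan L pmax
        ((PySem.List.pyRange 1 (((U.toNat : Nat) : Int) + 1) 1).reverse) PySem.Dict.empty with ⟨o, memo⟩
    rw [hscan] at hsp hs2
    dsimp at hsp hs2
    rw [hsp]
    dsimp only
    simp only [Option.getD_none]
    have hfinal := (pv_altF_eq L pmax N 0 memo hs2).1
    rw [hfinal]
    have hval : PySem.List.pyGetD P1 0 0 = pvGB L pmax N 0 :=
      hrowget 0 (by norm_num) hU
    rw [hval]
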